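-- pv_equiv track=rewrite | github.com/GizawAAiT/Codeforces | B_Seating_in_a_Bus.py | solve
-- ===== SOURCE A (Python) =====
-- def solve(moves):
--     left_most, right_most = moves[0], moves[0]
--     for move in moves[1:]:
--         if move < left_most-1 or move > right_most+1:
--             return "NO"
--
--         left_most = min(move, left_most)
--         right_most = max(move, right_most)
--
--     return "YES"
-- ===== SOURCE B (Python) =====
-- def solve(moves):
--     los = [moves[0]]
--     his = [moves[0]]
--     for m in moves[1:]:
--         los.append(min(los[-1], m))
--         his.append(max(his[-1], m))
--     ok = all(lo - 1 <= m <= hi + 1 for m, lo, hi in zip(moves[1:], los, his))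
--     return "YES" if ok else "NO"
-- ===== Notes on version B (the rewrite author's own statement) =====
-- stated objective: alternative
-- what changed: B replaces A's single pass with early return by two staged passes: it first builds the full prefix-minimum and prefix-maximum arrays, then checks every move against its prefix extrema with one all() over the zipped arrays.
import Mathlib
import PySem

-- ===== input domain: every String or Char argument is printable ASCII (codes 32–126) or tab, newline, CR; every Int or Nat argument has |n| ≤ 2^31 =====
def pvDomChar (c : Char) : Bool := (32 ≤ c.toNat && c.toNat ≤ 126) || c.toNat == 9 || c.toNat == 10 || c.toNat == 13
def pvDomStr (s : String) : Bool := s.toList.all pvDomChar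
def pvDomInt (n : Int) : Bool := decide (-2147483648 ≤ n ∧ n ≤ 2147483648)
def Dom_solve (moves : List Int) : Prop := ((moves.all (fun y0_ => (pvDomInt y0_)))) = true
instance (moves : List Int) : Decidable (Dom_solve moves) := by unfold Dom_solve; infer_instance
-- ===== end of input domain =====

-- B replaces A's single early-returning pass over running min/max with two staged
-- passes: build the prefix-extrema arrays, then check all moves at once (objective: alternative).

-- ===== PORT A =====
-- the for-loop over moves[1:] with state (left_most, right_most), early return "NO"
def solveLoop (leftMost rightMost : Int) (rest : List Int) : String :=
  match rest with
  | [] => "YES"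
  | move :: ms =>
    if move < leftMost - 1 ∨ move > rightMost + 1 then "NO"
    else solveLoop (min move leftMost) (max move rightMost) ms

def solve (moves : List Int) : String :=
  match moves with
  | [] => ""   -- indexing the first element raises IndexError in Python; excluded by Pre_solve
  | m :: ms => solveLoop m m ms

-- ===== PORT B =====
-- pass 1: the loop appending min(los[-1], m) / max(his[-1], m); los/his are never
-- empty here, so getLastD 0 is exactly Python's los[-1].
def extLoop (p : List Int × List Int) (rest : List Int) : List Int × List Int :=
  rest.foldl (fun p x => (p.1 ++ [min (p.1.getLastD 0) x], p.2 ++ [max (p.2.getLastD 0) x])) p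

def solve_alt (moves : List Int) : String :=
  match moves with
  | [] => ""   -- indexing the first element raises IndexError in Python; excluded by Pre_solve
  | m :: ms =>
    let p := extLoop ([m], [m]) ms
    -- pass 2: all(lo - 1 <= m <= hi + 1 for m, lo, hi in zip(moves[1:], los, his))
    let ok := (ms.zip (p.1.zip p.2)).all (fun t => decide (t.2.1 - 1 ≤ t.1 ∧ t.1 ≤ t.2.2 + 1))
    if ok then "YES" else "NO"

-- ===== PRECONDITION & SPEC =====
-- Pre_ excludes only the empty list, on which both A and B raise IndexError indexing the first element.
def Pre_solve (moves : List Int) : Prop := moves ≠ []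
instance (moves : List Int) : Decidable (Pre_solve moves) := by unfold Pre_solve; infer_instance
def pvWitness_solve : List Int := [3, 2, 4]

def Spec_solve (moves : List Int) (out : String) : Prop := out = solve_alt moves
instance (moves : List Int) (out : String) : Decidable (Spec_solve moves out) := by unfold Spec_solve; infer_instance

-- ===== CLAIM (what is proved, stated in full; the proofs are below) =====
def Claim_equal_solve : Prop := ∀ (moves : List Int), Dom_solve moves → Pre_solve moves → Spec_solve moves (solve moves)

-- ===== LEMMAS AND PROOFS =====

-- running prefix minima / maxima as pure functions
def prefLos (l : Int) : List Int → List Int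
  | [] => []
  | x :: t => (min l x) :: prefLos (min l x) t

def prefHis (r : Int) : List Int → List Int
  | [] => []
  | x :: t => (max r x) :: prefHis (max r x) t

theorem extLoop_eq (ms : List Int) : ∀ (los his : List Int) (l r : Int),
    los.getLastD 0 = l → his.getLastD 0 = r →
    extLoop (los, his) ms = (los ++ prefLos l ms, his ++ prefHis r ms) := by
  induction ms with
  | nil => intro los his l r _ _; simp [extLoop, prefLos, prefHis]
  | cons x t ih =>
    intro los his l r hl hr
    have h1 : (los ++ [min l x]).getLastD 0 = min l x := List.getLastD_concat ..
    have h2 : (his ++ [max r x]).getLastD 0 = max r x := List.getLastD_concat ..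
    have key := ih (los ++ [min l x]) (his ++ [max r x]) (min l x) (max r x) h1 h2
    simp only [extLoop, List.foldl_cons] at key ⊢
    rw [hl, hr, key, prefLos, prefHis]
    simp [List.append_assoc]

theorem solveLoop_eq (ms : List Int) : ∀ (l r : Int),
    solveLoop l r ms =
      if (ms.zip ((l :: prefLos l ms).zip (r :: prefHis r ms))).all
          (fun t => decide (t.2.1 - 1 ≤ t.1 ∧ t.1 ≤ t.2.2 + 1))
      then "YES" else "NO" := by
  induction ms with
  | nil => intro l r; simp [solveLoop]
  | cons x t ih =>
    intro l r
    have hzip : (((x :: t).zip ((l :: prefLos l (x :: t)).zip (r :: prefHis r (x :: t)))).all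
        (fun t => decide (t.2.1 - 1 ≤ t.1 ∧ t.1 ≤ t.2.2 + 1)))
        = (decide (l - 1 ≤ x ∧ x ≤ r + 1) &&
           ((t.zip (((min l x) :: prefLos (min l x) t).zip ((max r x) :: prefHis (max r x) t))).all
             (fun t => decide (t.2.1 - 1 ≤ t.1 ∧ t.1 ≤ t.2.2 + 1)))) := by
      simp [prefLos, prefHis]
    by_cases h : x < l - 1 ∨ x > r + 1
    · have hd : decide (l - 1 ≤ x ∧ x ≤ r + 1) = false := by
        simp only [decide_eq_false_iff_not]; omega
      rw [show solveLoop l r (x :: t) = "NO" from by rw [solveLoop, if_pos h],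
        hzip, hd, Bool.false_and]
      simp
    · have hd : decide (l - 1 ≤ x ∧ x ≤ r + 1) = true := decide_eq_true (by omega)
      rw [show solveLoop l r (x :: t) = solveLoop (min x l) (max x r) t from by
          rw [solveLoop, if_neg h],
        ih (min x l) (max x r), hzip, hd, Bool.true_and, min_comm x l, max_comm x r]

-- ===== VERDICT (by name: the statement is the Claim_ definition above) =====
theorem solve_spec : Claim_equal_solve := by
  intro moves _ hpre
  unfold Spec_solve
  match moves with
  | [] => exact absurd rfl hpre
  | m :: ms =>
    simp only [solve, solve_alt]
    rw [extLoop_eq ms [m] [m] m m rfl rfl]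
    simpa using solveLoop_eq ms m m
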